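-- pv_equiv track=rewrite | github.com/youwol/py-youwol | youwol/pipelines/flux_pack_tutorial/files_template/scripts/auto-gen.py | order_dependencies
-- ===== SOURCE A (Python) =====
-- import itertools
--
-- def order_dependencies(dependencies, groups):
--     r = []
--     for d in dependencies:
--         if "namespace" in d:
--             r.append(d)
--         else:
--             r.insert(0, d)
--     if (not groups):
--         return r
--     groups = [g if isinstance(g, list) else [g] for g in groups]
--     flattened = list(itertools.chain.from_iterable(groups))
--
--     def index(e):
--         try:
--             return flattened.index(e["id"])
--         except:
--             return len(flattened)
--
--     r.sort(key=index)
--     return r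
-- ===== SOURCE B (Python) =====
-- def order_dependencies(dependencies, groups):
--     front, back = [], []
--     for d in dependencies:
--         (back if "namespace" in d else front).append(d)
--     r = front[::-1] + back
--     if not groups:
--         return r
--     groups = [g if isinstance(g, list) else [g] for g in groups]
--     flattened = [e for g in groups for e in g]
--     pos = {}
--     for i, e in enumerate(flattened):
--         pos.setdefault(e, i)
--     n = len(flattened)
--     buckets = {}
--     for d in r:
--         k = pos.get(d["id"], n) if "id" in d else n
--         buckets.setdefault(k, []).append(d)
--     return [d for i in sorted(buckets) for d in buckets[i]]
-- ===== Notes on version B (the rewrite author's own statement) =====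
-- stated objective: alternative
-- what changed: Replaces the comparison sort whose key calls flattened.index (a linear scan per element) with a first-index dict built once plus a stable bucket sort (group r into key-buckets, then emit buckets by sorted distinct key), and builds the namespace partition with two append-only lists instead of insert(0).
import Mathlib
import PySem

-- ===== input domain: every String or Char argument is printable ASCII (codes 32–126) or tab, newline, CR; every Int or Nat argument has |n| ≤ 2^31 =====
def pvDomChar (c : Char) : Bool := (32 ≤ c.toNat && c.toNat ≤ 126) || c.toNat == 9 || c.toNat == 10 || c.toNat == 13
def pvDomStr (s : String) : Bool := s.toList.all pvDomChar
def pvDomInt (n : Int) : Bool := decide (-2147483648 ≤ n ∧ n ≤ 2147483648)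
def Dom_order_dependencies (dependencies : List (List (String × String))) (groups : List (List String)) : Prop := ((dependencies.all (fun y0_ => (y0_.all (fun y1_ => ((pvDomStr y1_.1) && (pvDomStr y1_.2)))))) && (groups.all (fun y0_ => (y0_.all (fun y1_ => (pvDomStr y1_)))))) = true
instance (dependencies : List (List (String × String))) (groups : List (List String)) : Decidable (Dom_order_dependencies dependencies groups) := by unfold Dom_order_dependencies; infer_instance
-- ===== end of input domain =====

-- B replaces A's comparison sort (whose key scans flattened with .index) by a first-index
-- dict plus a stable bucket sort emitted by sorted distinct key; return values proved equal
-- on the whole domain.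

-- ===== PORT A =====
-- A's sort key: flattened.index(e["id"]), with the bare except returning len(flattened)
-- (both a missing "id" key and an id absent from flattened fall to the except branch).
def pyOrderKeyA (flattened : List String) (d : List (String × String)) : Int :=
  match (PySem.Dict.ofList d).get? "id" with
  | none => (flattened.length : Int)
  | some v =>
    match PySem.List.index? flattened v with
    | some j => (j : Int)
    | none => (flattened.length : Int)

def order_dependencies (dependencies : List (List (String × String))) (groups : List (List String)) : List (List (String × String)) :=
  -- for d in dependencies: append if "namespace" in d else insert(0, d)
  let r := dependencies.foldl
    (fun r d => if (PySem.Dict.ofList d).contains "namespace" then r ++ [d] else d :: r) []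
  if groups = [] then r
  else
    -- groups = [g if isinstance(g, list) else [g] for g in groups] is the identity here:
    -- under the type convention every g already is a list.
    let flattened := groups.flatten   -- itertools.chain.from_iterable
    PySem.List.sorted r (pyOrderKeyA flattened)   -- r.sort(key=index), stable

-- ===== PORT B =====
-- B's key: pos.get(d["id"], n) if "id" in d else n, with pos the first-index dict.
def pyOrderKeyB (pos : PySem.Dict String Int) (n : Int) (d : List (String × String)) : Int :=
  match (PySem.Dict.ofList d).get? "id" with
  | none => n
  | some v => pos.getD v n

def order_dependencies_alt (dependencies : List (List (String × String))) (groups : List (List String)) : List (List (String × String)) :=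
  let fb := dependencies.foldl
    (fun fb d => if (PySem.Dict.ofList d).contains "namespace" then (fb.1, fb.2 ++ [d]) else (fb.1 ++ [d], fb.2))
    (([], []) : List (List (String × String)) × List (List (String × String)))
  let r := fb.1.reverse ++ fb.2   -- front[::-1] + back
  if groups = [] then r
  else
    let flattened := groups.flatten
    -- pos.setdefault(e, i) over enumerate(flattened)
    let pos := (PySem.List.enumerate flattened 0).foldl
      (fun p ie => p.setdefault ie.2 ie.1) PySem.Dict.empty
    let n : Int := (flattened.length : Int)
    -- buckets.setdefault(k, []).append(d)  ==  buckets[k] = buckets.get(k, []) + [d]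
    let buckets := r.foldl
      (fun b d => b.modify (pyOrderKeyB pos n d) [] (fun l => l ++ [d])) PySem.Dict.empty
    -- [d for i in sorted(buckets) for d in buckets[i]]: i ranges over buckets' keys, so
    -- Python's buckets[i] always succeeds; getD with default [] is exact here.
    (PySem.List.sorted buckets.keys (fun i => i)).flatMap (fun i => buckets.getD i [])

-- ===== PRECONDITION & SPEC =====
def Spec_order_dependencies (dependencies : List (List (String × String))) (groups : List (List String)) (out : List (List (String × String))) : Prop := out = order_dependencies_alt dependencies groups
instance (dependencies : List (List (String × String))) (groups : List (List String)) (out : List (List (String × String))) : Decidable (Spec_order_dependencies dependencies groups out) := by unfold Spec_order_dependencies; infer_instance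

-- ===== CLAIM (what is proved, stated in full; the proofs are below) =====
def Claim_equal_order_dependencies : Prop := ∀ (dependencies : List (List (String × String))) (groups : List (List String)), Dom_order_dependencies dependencies groups → Spec_order_dependencies dependencies groups (order_dependencies dependencies groups)

-- ===== LEMMAS AND PROOFS =====

-- A's partition loop (append / insert(0)) in closed form.
lemma foldA_eq {α : Type} (p : α → Bool) (l : List α) :
    ∀ (acc : List α),
      l.foldl (fun r d => if p d then r ++ [d] else d :: r) acc
        = (l.filter (fun d => !p d)).reverse ++ acc ++ l.filter p := by
  induction l with
  | nil => intro acc; simp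
  | cons d l ih =>
    intro acc
    by_cases h : p d
    · simp [h, ih]
    · simp [h, ih]

-- B's partition loop (two append-only lists) in closed form.
lemma foldB_eq {α : Type} (p : α → Bool) (l : List α) :
    ∀ (f0 b0 : List α),
      l.foldl (fun fb d => if p d then (fb.1, fb.2 ++ [d]) else (fb.1 ++ [d], fb.2)) (f0, b0)
        = (f0 ++ l.filter (fun d => !p d), b0 ++ l.filter p) := by
  induction l with
  | nil => intro f0 b0; simp
  | cons d l ih =>
    intro f0 b0
    by_cases h : p d
    · simp [h, ih]
    · simp [h, ih]

-- The two partition results coincide.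
lemma part_eq {α : Type} (p : α → Bool) (l : List α) :
    l.foldl (fun r d => if p d then r ++ [d] else d :: r) []
      = (l.foldl (fun fb d => if p d then (fb.1, fb.2 ++ [d]) else (fb.1 ++ [d], fb.2))
          (([], []) : List α × List α)).1.reverse
        ++ (l.foldl (fun fb d => if p d then (fb.1, fb.2 ++ [d]) else (fb.1 ++ [d], fb.2))
          (([], []) : List α × List α)).2 := by
  rw [foldA_eq, foldB_eq]
  simp

-- The setdefault loop over enumerate(flattened) stores the FIRST index of each id.
lemma pos_get? (l : List String) (v : String) :
    ((PySem.List.enumerate l 0).foldl (fun p ie => p.setdefault ie.2 ie.1)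
        (PySem.Dict.empty : PySem.Dict String Int)).get? v
      = (PySem.List.index? l v).map (fun j => (j : Int)) := by
  induction l using List.reverseRecOn with
  | nil => simp [PySem.List.enumerate_nil, PySem.Dict.get?_empty, PySem.List.index?_eq_idxOf?]
  | append_singleton l x ih =>
    rw [PySem.List.enumerate_append, List.foldl_append]
    have hx : PySem.List.enumerate [x] (0 + (l.length : Int)) = [((l.length : Int), x)] := by
      simp [PySem.List.enumerate_cons, PySem.List.enumerate_nil]
    rw [hx]
    simp only [List.foldl_cons, List.foldl_nil]
    by_cases hv : v = x
    · subst hv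
      rw [PySem.Dict.get?_setdefault_self]
      by_cases hm : v ∈ l
      · have hs : (PySem.List.index? l v).isSome := (PySem.List.index?_isSome_iff l v).mpr hm
        obtain ⟨j, hj⟩ := Option.isSome_iff_exists.mp hs
        rw [PySem.List.index?_append_of_mem [v] hm, ih, hj]
        simp
      · have hn : PySem.List.index? l v = none := (PySem.List.index?_eq_none_iff l v).mpr hm
        rw [PySem.List.index?_append_singleton_self l v hm, ih, hn]
        simp
    · rw [PySem.Dict.get?_setdefault_of_ne _ _ hv, ih]
      by_cases hm : v ∈ l
      · rw [PySem.List.index?_append_of_mem [x] hm]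
      · have h1 : PySem.List.index? l v = none := (PySem.List.index?_eq_none_iff l v).mpr hm
        have h2 : PySem.List.index? (l ++ [x]) v = none := by
          refine (PySem.List.index?_eq_none_iff _ v).mpr ?_
          simp [hm, hv]
        rw [h1, h2]

-- The two keys agree.
lemma key_eq (flattened : List String) (d : List (String × String)) :
    pyOrderKeyB
      ((PySem.List.enumerate flattened 0).foldl (fun p ie => p.setdefault ie.2 ie.1) PySem.Dict.empty)
      (flattened.length : Int) d
      = pyOrderKeyA flattened d := by
  unfold pyOrderKeyA pyOrderKeyB
  cases (PySem.Dict.ofList d).get? "id" with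
  | none => rfl
  | some v =>
    dsimp only
    rw [PySem.Dict.getD_eq_get?_getD, pos_get?]
    cases PySem.List.index? flattened v with
    | none => rfl
    | some j => rfl

-- insertBy past elements it is not "before", in front of elements it is "before".
lemma insertBy_concat {α : Type} (before : α → α → Bool) (x : α) :
    ∀ (A B : List α), (∀ y ∈ A, before x y = false) → (∀ y ∈ B, before x y = true) →
      PySem.List.insertBy before x (A ++ B) = A ++ x :: B := by
  intro A
  induction A with
  | nil =>
    intro B _ hB
    cases B with
    | nil => simp [PySem.List.insertBy]
    | cons b B' => simp [PySem.List.insertBy, hB b (by simp)]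
  | cons a A' ih =>
    intro B hA hB
    simp only [List.cons_append, PySem.List.insertBy, hA a (by simp), Bool.false_eq_true,
      if_false, List.cons.injEq, true_and]
    exact ih B (fun y hy => hA y (by simp [hy])) hB

-- Stable sort = concatenation of key-filters over any strictly increasing key list
-- covering all keys.  This is the heart of the equivalence.
lemma sorted_eq_flatMap_filter {α : Type} (key : α → Int) :
    ∀ (xs : List α) (ks : List Int), ks.Pairwise (· < ·) → (∀ x ∈ xs, key x ∈ ks) →
      PySem.List.sorted xs key
        = ks.flatMap (fun k => xs.filter (fun x => key x == k)) := by
  intro xs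
  induction xs using List.reverseRecOn with
  | nil =>
    intro ks _ _
    rw [PySem.List.sorted_eq_foldl_insertBy]
    simp
  | append_singleton ys x ih =>
    intro ks hks hmem
    have hx : key x ∈ ks := hmem x (by simp)
    obtain ⟨k₁, k₂, hdec⟩ := List.append_of_mem hx
    subst hdec
    have hpw := List.pairwise_append.mp hks
    have hk1lt : ∀ k ∈ k₁, k < key x := fun k hk => hpw.2.2 k hk (key x) (by simp)
    have hk2gt : ∀ k ∈ k₂, key x < k := (List.pairwise_cons.mp hpw.2.1).1
    have hk1ne : key x ∉ k₁ := fun h => lt_irrefl _ (hk1lt _ h)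
    have hk2ne : key x ∉ k₂ := fun h => lt_irrefl _ (hk2gt _ h)
    rw [PySem.List.sorted_eq_foldl_insertBy, List.foldl_append, List.foldl_cons, List.foldl_nil,
      ← PySem.List.sorted_eq_foldl_insertBy,
      ih _ hks (fun y hy => hmem y (by simp [hy]))]
    have hA : ∀ y ∈ k₁.flatMap (fun k => ys.filter (fun z => key z == k))
        ++ ys.filter (fun z => key z == key x), decide (key x < key y) = false := by
      intro y hy
      rcases List.mem_append.mp hy with hy | hy
      · obtain ⟨k, hk, hyk⟩ := List.mem_flatMap.mp hy
        have hky : key y = k := by simpa using (List.mem_filter.mp hyk).2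
        simp [hky]
        exact le_of_lt (hk1lt k hk)
      · have hky : key y = key x := by simpa using (List.mem_filter.mp hy).2
        simp [hky]
    have hB : ∀ y ∈ k₂.flatMap (fun k => ys.filter (fun z => key z == k)),
        decide (key x < key y) = true := by
      intro y hy
      obtain ⟨k, hk, hyk⟩ := List.mem_flatMap.mp hy
      have hky : key y = k := by simpa using (List.mem_filter.mp hyk).2
      simp [hky]
      exact hk2gt k hk
    have hins := insertBy_concat (fun a b => decide (key a < key b)) x
      (k₁.flatMap (fun k => ys.filter (fun z => key z == k)) ++ ys.filter (fun z => key z == key x))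
      (k₂.flatMap (fun k => ys.filter (fun z => key z == k))) hA hB
    have hfk1 : k₁.flatMap (fun k => (ys ++ [x]).filter (fun z => key z == k))
        = k₁.flatMap (fun k => ys.filter (fun z => key z == k)) := by
      refine List.flatMap_congr ?_ ; intro k hk
      rw [List.filter_append]
      have : key x ≠ k := fun h => hk1ne (h ▸ hk)
      simp [this]
    have hfk2 : k₂.flatMap (fun k => (ys ++ [x]).filter (fun z => key z == k))
        = k₂.flatMap (fun k => ys.filter (fun z => key z == k)) := by
      refine List.flatMap_congr ?_ ; intro k hk
      rw [List.filter_append]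
      have : key x ≠ k := fun h => hk2ne (h ▸ hk)
      simp [this]
    have hfx : (ys ++ [x]).filter (fun z => key z == key x)
        = ys.filter (fun z => key z == key x) ++ [x] := by
      rw [List.filter_append]; simp
    rw [List.flatMap_append, List.flatMap_cons, List.flatMap_append, List.flatMap_cons,
      hfk1, hfk2, hfx]
    simp only [List.append_assoc, List.singleton_append] at hins ⊢
    exact hins

-- The bucket dict, read back bucket by bucket, is the key-filter of r.
lemma buckets_getD {α : Type} (k : α → Int) (r : List α) (i : Int) :
    (r.foldl (fun b d => b.modify (k d) [] (fun l => l ++ [d]))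
        (PySem.Dict.empty : PySem.Dict Int (List α))).getD i []
      = r.filter (fun d => k d == i) := by
  have h := PySem.Dict.getD_foldl_modify_append (r.map (fun d => (k d, d)))
    (PySem.Dict.empty : PySem.Dict Int (List α)) i
  rw [List.foldl_map] at h
  simp only [PySem.Dict.getD_empty, List.nil_append] at h
  rw [h, List.filter_map]
  simp [Function.comp_def]

-- Bucket-sort tail: grouping r into key-buckets and emitting buckets in sorted distinct
-- key order reproduces the stable sort of r by that key.
lemma bucket_tail_eq {α : Type} (K : α → Int) (r : List α) :
    PySem.List.sorted r K
      = (PySem.List.sorted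
          ((r.foldl (fun b d => b.modify (K d) [] (fun l => l ++ [d]))
            (PySem.Dict.empty : PySem.Dict Int (List α))).keys) (fun i => i)).flatMap
          (fun i => (r.foldl (fun b d => b.modify (K d) [] (fun l => l ++ [d]))
            (PySem.Dict.empty : PySem.Dict Int (List α))).getD i []) := by
  have hkeys : (r.foldl (fun b d => b.modify (K d) [] (fun l => l ++ [d]))
      (PySem.Dict.empty : PySem.Dict Int (List α))).keys
      = PySem.Set.ofList (r.map K) := by
    rw [PySem.Dict.keys_foldl_modify_key]
    simp [PySem.Dict.keys_empty, PySem.Set.update_nil_left]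
  rw [hkeys]
  have hpw : (PySem.List.sorted (PySem.Set.ofList (r.map K)) (fun i => i)).Pairwise (· < ·) :=
    PySem.List.sorted_ofList_pairwise_lt (r.map K)
  have hmem : ∀ x ∈ r, K x ∈ PySem.List.sorted (PySem.Set.ofList (r.map K)) (fun i => i) := by
    intro x hx
    rw [PySem.List.mem_sorted, PySem.Set.mem_ofList]
    exact List.mem_map_of_mem hx
  rw [sorted_eq_flatMap_filter K r _ hpw hmem]
  exact List.flatMap_congr (fun i _ => (buckets_getD K r i).symm)

-- ===== VERDICT (by name: the statement is the Claim_ definition above) =====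
theorem order_dependencies_spec : Claim_equal_order_dependencies := by
  intro deps groups _
  unfold Spec_order_dependencies order_dependencies order_dependencies_alt
  simp only []
  rw [← part_eq (fun d => (PySem.Dict.ofList d).contains "namespace") deps]
  by_cases hg : groups = []
  · simp [hg]
  · simp only [hg, if_false]
    set r := deps.foldl
      (fun r d => if (PySem.Dict.ofList d).contains "namespace" then r ++ [d] else d :: r) [] with hr
    set flattened := groups.flatten with hf
    have hfold : r.foldl (fun b d => b.modify (pyOrderKeyB
        ((PySem.List.enumerate flattened 0).foldl (fun p ie => p.setdefault ie.2 ie.1) PySem.Dict.empty)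
        (flattened.length : Int) d) [] (fun l => l ++ [d]))
        (PySem.Dict.empty : PySem.Dict Int (List (List (String × String))))
        = r.foldl (fun b d => b.modify (pyOrderKeyA flattened d) [] (fun l => l ++ [d]))
          PySem.Dict.empty := by
      apply List.foldl_ext
      intro b d _
      rw [key_eq flattened d]
    rw [hfold]
    exact bucket_tail_eq (pyOrderKeyA flattened) r
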